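-- pv_equiv track=rewrite | github.com/zhouxianggen/frog | simhash.py | simhash
-- ===== SOURCE A (Python) =====
-- def string_hash(v, hashbits=128):
--     if v == "":
--         return 0
--     else:
--         x = ord(v[0])<<7
--         m = 1000003
--         mask = 2**hashbits-1
--         for c in v:
--             x = ((x*m)^ord(c)) & mask
--         x ^= len(v)
--         if x == -1:
--             x = -2
--         return x
--
-- def simhash(tokens, hashbits=128):
--     v = [0] * hashbits
--
--     for t in [string_hash(x, hashbits) for x in tokens]:
--         bitmask = 0
--         for i in range(hashbits):
--             bitmask = 1 << i
--             if t & bitmask: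
--                 v[i] += 1
--             else:
--                 v[i] += -1
--
--     return ''.join(['1' if v[i] >= 0 else '0' for i in range(hashbits)])
-- ===== SOURCE B (Python) =====
-- def string_hash(v, hashbits=128):
--     if v == "":
--         return 0
--     else:
--         x = ord(v[0])<<7
--         m = 1000003
--         mask = 2**hashbits-1
--         for c in v:
--             x = ((x*m)^ord(c)) & mask
--         x ^= len(v)
--         if x == -1:
--             x = -2
--         return x
--
-- def simhash(tokens, hashbits=128):
--     hashes = [string_hash(x, hashbits) for x in tokens]
--     n = len(tokens)
--     return ''.join(
--         '1' if 2 * sum(1 for h in hashes if h & (1 << i)) >= n else '0'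
--         for i in range(hashbits)
--     )
-- ===== Notes on version B (the rewrite author's own statement) =====
-- stated objective: simpler
-- what changed: The mutable +1/-1 accumulator array v[] and its per-token inner mutation loop are replaced by a single pass per bit position that counts tokens with that bit set and emits '1' iff 2*count >= n (the identity v[i] = 2*count_i - n).
import Mathlib
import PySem

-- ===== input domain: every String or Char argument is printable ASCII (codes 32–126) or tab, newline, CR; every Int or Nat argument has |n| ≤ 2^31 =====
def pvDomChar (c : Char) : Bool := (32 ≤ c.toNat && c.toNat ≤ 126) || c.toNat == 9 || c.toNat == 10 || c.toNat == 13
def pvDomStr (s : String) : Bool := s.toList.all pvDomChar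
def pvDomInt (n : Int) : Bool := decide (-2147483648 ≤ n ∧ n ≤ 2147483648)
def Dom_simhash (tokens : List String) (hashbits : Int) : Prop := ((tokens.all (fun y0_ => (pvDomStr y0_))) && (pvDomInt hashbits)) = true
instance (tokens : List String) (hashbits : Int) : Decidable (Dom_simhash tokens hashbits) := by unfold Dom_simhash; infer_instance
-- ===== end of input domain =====

-- B replaces A's mutable +1/-1 accumulator array with a per-bit count-and-compare
-- (emit '1' iff 2*count_i >= n), for a simpler, loop-state-free formulation.


-- ===== PORT A =====
-- shared module helper string_hash, ported verbatim (both Pythons keep it unchanged).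
-- mask = 2**hashbits-1 is ported as 2^hashbits.toNat - 1: exact for hashbits ≥ 0, and
-- under Pre_ a call with hashbits < 0 only ever reaches the early 'v == ""' return.
def stringHash (v : String) (hashbits : Int) : Int :=
  if v = "" then 0
  else
    let cs := v.toList
    let x : Int := ((cs.headD ' ').toNat : Int) <<< 7
    let m : Int := 1000003
    let mask : Int := 2 ^ hashbits.toNat - 1
    let x := cs.foldl (fun x c => PySem.Int.band (PySem.Int.bxor (x * m) (c.toNat : Int)) mask) x
    let x := PySem.Int.bxor x (cs.length : Int)
    if x = -1 then -2 else x

def simhash (tokens : List String) (hashbits : Int) : String :=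
  let v : List Int := List.replicate hashbits.toNat 0
  let v := (tokens.map (fun x => stringHash x hashbits)).foldl
    (fun v t =>
      (PySem.List.pyRange 0 hashbits 1).foldl
        (fun v i =>
          if PySem.Int.band t (1 <<< i.toNat) ≠ 0 then v.modify i.toNat (· + 1)
          else v.modify i.toNat (· + (-1))) v) v
  PySem.Str.join "" ((PySem.List.pyRange 0 hashbits 1).map
    (fun i => if 0 ≤ PySem.List.pyGetD v i 0 then "1" else "0"))

-- ===== PORT B =====
def simhash_alt (tokens : List String) (hashbits : Int) : String :=
  let hashes := tokens.map (fun x => stringHash x hashbits)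
  let n := tokens.length
  PySem.Str.join "" ((PySem.List.pyRange 0 hashbits 1).map
    (fun i =>
      if (n : Int) ≤ 2 * (hashes.countP (fun h => PySem.Int.band h (1 <<< i.toNat) ≠ 0) : Int)
      then "1" else "0"))

-- ===== PRECONDITION & SPEC =====
-- Pre_ excludes only hashbits < 0 with some nonempty token: there Python A raises
-- TypeError (2**hashbits is a float, so '& mask' fails inside string_hash).
def Pre_simhash (tokens : List String) (hashbits : Int) : Prop :=
  hashbits < 0 → ∀ t ∈ tokens, t = ""
instance (tokens : List String) (hashbits : Int) : Decidable (Pre_simhash tokens hashbits) := by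
  unfold Pre_simhash; infer_instance

def pvWitness_simhash : List String × Int := (["ab", "c"], 8)

def Spec_simhash (tokens : List String) (hashbits : Int) (out : String) : Prop := out = simhash_alt tokens hashbits
instance (tokens : List String) (hashbits : Int) (out : String) : Decidable (Spec_simhash tokens hashbits out) := by unfold Spec_simhash; infer_instance

-- ===== CLAIM (what is proved, stated in full; the proofs are below) =====
def Claim_equal_simhash : Prop := ∀ (tokens : List String) (hashbits : Int), Dom_simhash tokens hashbits → Pre_simhash tokens hashbits → Spec_simhash tokens hashbits (simhash tokens hashbits)

-- ===== LEMMAS AND PROOFS =====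

theorem pv_length_foldl_modify (f : Nat → Int → Int) (n : Nat) :
    ∀ v : List Int,
      ((List.range n).foldl (fun w k => w.modify k (f k)) v).length = v.length := by
  induction n with
  | zero => intro v; simp
  | succ n ih =>
      intro v
      rw [List.range_succ, List.foldl_append]
      simp [List.length_modify, ih v]

theorem pv_getD_modify (w : List Int) (i j : Nat) (g : Int → Int) :
    (w.modify i g).getD j 0 = if i = j ∧ j < w.length then g (w.getD j 0) else w.getD j 0 := by
  simp only [List.getD_eq_getElem?_getD, List.getElem?_modify]
  by_cases hj : j < w.length
  · by_cases hij : i = j <;> simp [hij, hj]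
  · simp [hj]

theorem pv_getD_foldl_modify (f : Nat → Int) (n : Nat) :
    ∀ (v : List Int) (j : Nat),
      ((List.range n).foldl (fun w k => w.modify k (· + f k)) v).getD j 0
        = v.getD j 0 + (if j < n ∧ j < v.length then f j else 0) := by
  induction n with
  | zero => intro v j; simp
  | succ n ih =>
      intro v j
      rw [List.range_succ, List.foldl_append]
      simp only [List.foldl_cons, List.foldl_nil]
      rw [pv_getD_modify, pv_length_foldl_modify, ih]
      by_cases hjv : j < v.length
      · by_cases hjn : j = n
        · subst hjn
          simp [hjv]
        · have hnj : ¬ (n = j) := fun h => hjn h.symm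
          by_cases hlt : j < n
          · simp [hjv, hlt, hnj, Nat.lt_succ_of_lt hlt]
          · have h2 : ¬ j < n + 1 := by omega
            simp [hjv, hlt, hnj, h2]
      · simp [hjv]

-- the inner per-token loop of port A, rebased to a Nat-indexed fold
theorem pv_inner_rebase (t L : Int) (v : List Int) :
    ((PySem.List.pyRange 0 L 1).foldl
        (fun v i =>
          if PySem.Int.band t (1 <<< i.toNat) ≠ 0 then v.modify i.toNat (· + 1)
          else v.modify i.toNat (· + (-1))) v)
      = (List.range L.toNat).foldl
          (fun w k => w.modify k (· + (if PySem.Int.band t (1 <<< k) ≠ 0 then 1 else -1))) v := by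
  rw [PySem.List.pyRange_one, List.foldl_map]
  have hfun : (fun (x : List Int) (y : Nat) =>
      if PySem.Int.band t (1 <<< ((0 : Int) + (y : Int)).toNat) ≠ 0 then
        x.modify ((0 : Int) + (y : Int)).toNat (· + 1)
      else x.modify ((0 : Int) + (y : Int)).toNat (· + (-1)))
      = (fun (w : List Int) (k : Nat) =>
          w.modify k (· + (if PySem.Int.band t (1 <<< k) ≠ 0 then 1 else -1))) := by
    funext w k
    simp only [zero_add, Int.toNat_natCast]
    split_ifs with hb <;> rfl
  rw [hfun]
  norm_num

theorem pv_inner_length (t L : Int) (v : List Int) :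
    ((PySem.List.pyRange 0 L 1).foldl
        (fun v i =>
          if PySem.Int.band t (1 <<< i.toNat) ≠ 0 then v.modify i.toNat (· + 1)
          else v.modify i.toNat (· + (-1))) v).length = v.length := by
  rw [pv_inner_rebase]
  exact pv_length_foldl_modify _ _ v

-- the outer loop over all token hashes: entry j ends at 2*count_j - #hashes
theorem pv_outer (L : Int) (hs : List Int) :
    ∀ (v : List Int) (j : Nat), v.length = L.toNat → j < L.toNat →
      (hs.foldl
          (fun v t =>
            (PySem.List.pyRange 0 L 1).foldl
              (fun v i =>
                if PySem.Int.band t (1 <<< i.toNat) ≠ 0 then v.modify i.toNat (· + 1)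
                else v.modify i.toNat (· + (-1))) v) v).getD j 0
        = v.getD j 0
          + 2 * (hs.countP (fun h => PySem.Int.band h (1 <<< j) ≠ 0) : Int) - hs.length := by
  induction hs with
  | nil => intro v j _ _; simp
  | cons t hs ih =>
      intro v j hv hj
      simp only [List.foldl_cons]
      rw [ih _ j (by rw [pv_inner_length, hv]) hj, pv_inner_rebase, pv_getD_foldl_modify,
        List.countP_cons]
      have hjv : j < v.length := by omega
      rcases eq_or_ne (PySem.Int.band t ((1 <<< j : Nat) : Int)) 0 with hb | hb
      · simp only [hb, ne_eq, not_true_eq_false, if_false, decide_false, hj, hjv, and_self,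
          if_true, List.length_cons]
        push_cast
        ring
      · simp only [ne_eq, hb, not_false_eq_true, if_true, decide_true, hj, hjv, and_self,
          List.length_cons]
        push_cast
        ring

-- ===== VERDICT (by name: the statement is the Claim_ definition above) =====
theorem simhash_spec : Claim_equal_simhash := by
  intro tokens hashbits _ _
  unfold Spec_simhash simhash simhash_alt
  refine congrArg (PySem.Str.join "") (List.map_congr_left ?_)
  intro i hi
  obtain ⟨h0, hL⟩ := (PySem.List.mem_pyRange_one).1 hi
  have hiL : i.toNat < hashbits.toNat := by omega
  have hlen : (List.replicate hashbits.toNat (0 : Int)).length = hashbits.toNat := by simp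
  rw [PySem.List.pyGetD_of_nonneg _ _ h0,
    pv_outer hashbits (tokens.map (fun x => stringHash x hashbits)) _ i.toNat hlen hiL]
  have hc : (List.replicate hashbits.toNat (0 : Int)).getD i.toNat 0 = 0 := by
    simp [List.getD_eq_getElem?_getD, List.getElem?_replicate, apply_ite (fun o => Option.getD o (0 : Int))]
  rw [hc]
  simp only [List.length_map, zero_add]
  split_ifs with h1 h2 h2 <;> first | rfl | (exfalso; omega)
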